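-- pv_equiv track=rewrite | github.com/cmdsa/MEI-1920 | 1ºANO/2ºSemestre/Criptografia/Estruturas Criptograficas/TP4/cshake.py | left_encode
-- ===== SOURCE A (Python) =====
-- def left_encode(x):
--     """function bytepad
--
--         left_encode(x) encodes the integer x as a byte string in a way that can be unambiguously parsed from the beginning of the string by inserting the length of the byte string before the byte string representation of x. As an example, left_encode(0) will yield 00000001 00000000.
--
--         Args:
--         x: the input integer
--
--         Returns:
--         O: binary string
--     """
--     if (x >= 0) and (x < (1 << 2040)):
--         x_bin = '{0:b}'.format(x)
--         On = x_bin
--         while (len(On) % 8) != 0: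
--             On = '0' + On
--         n = len(On) // 8
--         n_bin = '{0:b}'.format(n)
--         O0 = n_bin
--         while (len(O0) % 8) != 0:
--             O0 = '0' + O0
--         O = O0 + On
--         return O
--     else:
--         print ('Invalid bit string (left_encode)')
-- ===== SOURCE B (Python) =====
-- def left_encode(x):
--     if (x >= 0) and (x < (1 << 2040)):
--         n = max(1, (x.bit_length() + 7) // 8)
--         xb = x.to_bytes(n, 'big')
--         payload = ''.join('{:08b}'.format(b) for b in xb)
--         return '{:08b}'.format(n) + payload
--     else:
--         print('Invalid bit string (left_encode)')
-- ===== Notes on version B (the rewrite author's own statement) =====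
-- stated objective: idiomatic
-- what changed: B computes the byte count in closed form from bit_length, converts x to bytes with to_bytes, and emits fixed 8-bit groups per byte, replacing A's bin-string building plus two prepend-'0'-until-multiple-of-8 while loops.
-- outside the precondition, e.g. on left_encode(-1): A returns None, B returns None
import Mathlib
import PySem

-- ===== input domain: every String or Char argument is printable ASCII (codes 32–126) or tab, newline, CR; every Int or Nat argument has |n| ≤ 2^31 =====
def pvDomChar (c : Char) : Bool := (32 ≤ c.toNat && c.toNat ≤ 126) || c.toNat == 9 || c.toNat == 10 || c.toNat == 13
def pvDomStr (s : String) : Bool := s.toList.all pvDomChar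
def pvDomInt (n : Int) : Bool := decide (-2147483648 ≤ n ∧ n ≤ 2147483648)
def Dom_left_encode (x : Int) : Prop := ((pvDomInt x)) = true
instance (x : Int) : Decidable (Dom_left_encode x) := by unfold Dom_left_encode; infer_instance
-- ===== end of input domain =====

-- B replaces A's bin-string building and pad-with-'0' while loops by a closed-form byte
-- count (bit_length) plus to_bytes and fixed 8-bit groups per byte (idiomatic; same cost).
-- Equality of the RETURN value is claimed on Pre_ (A prints and returns None elsewhere).

-- ===== PORT A =====
-- '{0:b}'.format(m) for m : Nat — digits MSB-first, "0" for 0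
def natBits (m : Nat) : List Char :=
  if m = 0 then [] else natBits (m / 2) ++ [if m % 2 = 1 then '1' else '0']
def fmtB (m : Nat) : List Char := if m = 0 then ['0'] else natBits m

-- the while-loop "On = '0' + On while len(On) % 8 != 0"
def padLoop (s : List Char) : List Char :=
  if s.length % 8 ≠ 0 then padLoop ('0' :: s) else s
termination_by (8 - s.length % 8) % 8
decreasing_by simp at *; omega

def left_encode (x : Int) : String :=
  if 0 ≤ x ∧ x < 1 <<< 2040 then
    let On := padLoop (fmtB x.toNat)
    let n := On.length / 8
    let O0 := padLoop (fmtB n)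
    String.mk (O0 ++ On)
  else ""   -- Python A prints and returns None here: excluded by Pre_left_encode

-- ===== PORT B =====
-- x.bit_length()
def pyBitLength (m : Nat) : Nat := if m = 0 then 0 else pyBitLength (m / 2) + 1
-- '{:08b}'.format(b)
def byte8 (b : Nat) : List Char :=
  (List.range 8).map (fun i => if b.testBit (7 - i) then '1' else '0')
-- x.to_bytes(n, 'big')
def toBytesBE (m n : Nat) : List Nat :=
  (List.range n).map (fun i => (m >>> (8 * (n - 1 - i))) % 256)

def left_encode_alt (x : Int) : String :=
  if 0 ≤ x ∧ x < 1 <<< 2040 then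
    let n := max 1 ((pyBitLength x.toNat + 7) / 8)
    let payload := (toBytesBE x.toNat n).flatMap byte8
    String.mk (byte8 n ++ payload)
  else ""   -- Python B prints and returns None here: excluded by Pre_left_encode

-- ===== PRECONDITION & SPEC =====
-- Pre_ excludes exactly the inputs on which A returns None (not a string): x < 0
-- (x ≥ 2^2040 also returns None but is outside Dom anyway).
def Pre_left_encode (x : Int) : Prop := 0 ≤ x ∧ x < 1 <<< 2040
instance (x : Int) : Decidable (Pre_left_encode x) := by unfold Pre_left_encode; infer_instance
def pvWitness_left_encode : Int := (5)
def Spec_left_encode (x : Int) (out : String) : Prop := out = left_encode_alt x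
instance (x : Int) (out : String) : Decidable (Spec_left_encode x out) := by unfold Spec_left_encode; infer_instance

-- ===== CLAIM (what is proved, stated in full; the proofs are below) =====
def Claim_equal_left_encode : Prop := ∀ (x : Int), Dom_left_encode x → Pre_left_encode x → Spec_left_encode x (left_encode x)

-- ===== LEMMAS AND PROOFS =====

-- canonical fixed-width big-endian bit string of m, width k
def bitsFix (k m : Nat) : List Char :=
  (List.range k).map (fun i => if m.testBit (k - 1 - i) then '1' else '0')

theorem bitsFix_length (k m : Nat) : (bitsFix k m).length = k := by
  simp [bitsFix]

theorem bitsFix_zero (m : Nat) : bitsFix 0 m = [] := by simp [bitsFix]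

-- split off the last (least-significant) 8 bits / one bit
theorem bitsFix_succ_last (k m : Nat) :
    bitsFix (k + 1) m = bitsFix k (m / 2) ++ [if m.testBit 0 then '1' else '0'] := by
  simp only [bitsFix, List.range_succ, List.map_append, List.map_cons, List.map_nil]
  congr 1
  · apply List.map_congr_left
    intro i hi
    have hik : i < k := List.mem_range.mp hi
    rw [Nat.testBit_div_two]
    have h2 : k - 1 - i + 1 = k + 1 - 1 - i := by omega
    rw [h2]
  · have h0 : k + 1 - 1 - k = 0 := by omega
    rw [h0]

-- split off the leading (most-significant) bit
theorem bitsFix_succ_head (k m : Nat) :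
    bitsFix (k + 1) m = (if m.testBit k then '1' else '0') :: bitsFix k m := by
  simp only [bitsFix, List.range_succ_eq_map, List.map_cons, List.map_map]
  congr 1
  apply List.map_congr_left
  intro i hi
  have hik : i < k := List.mem_range.mp hi
  simp only [Function.comp_apply, Nat.succ_eq_add_one]
  have h2 : k + 1 - 1 - (i + 1) = k - 1 - i := by omega
  rw [h2]

theorem bitsFix_succ_head_zero (k m : Nat) (h : m < 2 ^ k) :
    bitsFix (k + 1) m = '0' :: bitsFix k m := by
  rw [bitsFix_succ_head]
  have : m.testBit k = false := Nat.testBit_lt_two_pow h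
  simp [this]

theorem replicate_bitsFix (j k m : Nat) (h : m < 2 ^ k) :
    List.replicate j '0' ++ bitsFix k m = bitsFix (k + j) m := by
  induction j with
  | zero => simp
  | succ j ih =>
      have h' : m < 2 ^ (k + j) := lt_of_lt_of_le h (Nat.pow_le_pow_right (by norm_num) (by omega))
      rw [List.replicate_succ, List.cons_append, ih, ← bitsFix_succ_head_zero _ _ h']
      have h2 : k + (j + 1) = k + j + 1 := by omega
      rw [h2]

-- pyBitLength facts
theorem pyBitLength_lt (m : Nat) : m < 2 ^ pyBitLength m := by
  induction m using Nat.strong_induction_on with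
  | _ m ih =>
    unfold pyBitLength
    by_cases h0 : m = 0
    · simp [h0]
    · simp only [h0, if_false]
      have := ih (m / 2) (by omega)
      have : m / 2 < 2 ^ pyBitLength (m / 2) := this
      rw [pow_succ]
      omega

theorem pyBitLength_le_iff (k : Nat) : ∀ m : Nat, pyBitLength m ≤ k ↔ m < 2 ^ k := by
  induction k with
  | zero =>
      intro m
      by_cases h0 : m = 0
      · subst h0; simp [pyBitLength]
      · rw [show pyBitLength m = pyBitLength (m / 2) + 1 from by rw [pyBitLength, if_neg h0]]
        simp only [pow_zero]
        omega
  | succ k ih =>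
      intro m
      by_cases h0 : m = 0
      · subst h0
        rw [show pyBitLength 0 = 0 from by rw [pyBitLength]; simp]
        constructor
        · intro _; positivity
        · intro _; omega
      · rw [show pyBitLength m = pyBitLength (m / 2) + 1 from by rw [pyBitLength, if_neg h0]]
        have := ih (m / 2)
        rw [pow_succ]
        omega

-- natBits is the canonical bit string of exact width pyBitLength m
theorem natBits_eq (m : Nat) : natBits m = bitsFix (pyBitLength m) m := by
  induction m using Nat.strong_induction_on with
  | _ m ih =>
    unfold natBits pyBitLength
    by_cases h0 : m = 0
    · simp [h0, bitsFix_zero]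
    · simp only [h0, if_false]
      rw [ih (m / 2) (by omega), bitsFix_succ_last, Nat.testBit_zero]
      rcases Nat.mod_two_eq_zero_or_one m with h | h <;> simp [h]

theorem fmtB_eq (m : Nat) : fmtB m = bitsFix (max 1 (pyBitLength m)) m := by
  unfold fmtB
  by_cases h0 : m = 0
  · subst h0
    have : pyBitLength 0 = 0 := by simp [pyBitLength]
    rw [this]
    simp [bitsFix, List.range_succ]
  · have h1 : 1 ≤ pyBitLength m := by
      by_contra h
      have h2 : pyBitLength m ≤ 0 := by omega
      have := (pyBitLength_le_iff 0 m).mp h2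
      omega
    rw [if_neg h0, natBits_eq, Nat.max_eq_right h1]

theorem fmtB_lt (m : Nat) : m < 2 ^ max 1 (pyBitLength m) :=
  lt_of_lt_of_le (pyBitLength_lt m) (Nat.pow_le_pow_right (by norm_num) (le_max_right _ _))

-- the padding while-loop in closed form
theorem padLoop_eq (s : List Char) :
    padLoop s = List.replicate ((8 - s.length % 8) % 8) '0' ++ s := by
  induction s using padLoop.induct with
  | case1 s h ih =>
      rw [padLoop, if_pos h, ih]
      have : ((8 - ('0' :: s).length % 8) % 8) + 1 = (8 - s.length % 8) % 8 := by
        simp only [List.length_cons]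
        omega
      rw [← this, List.replicate_succ']
      simp
  | case2 s h =>
      rw [padLoop, if_neg h]
      have : (8 - s.length % 8) % 8 = 0 := by omega
      simp [this]

-- A's padded string is the canonical fixed-width string of width 8 * n(B)
theorem padLoop_fmtB (m : Nat) :
    padLoop (fmtB m) = bitsFix (8 * max 1 ((pyBitLength m + 7) / 8)) m := by
  rw [padLoop_eq, fmtB_eq, bitsFix_length, replicate_bitsFix _ _ _ (fmtB_lt m)]
  congr 1
  omega

-- byte8 is bitsFix 8
theorem byte8_eq (b : Nat) : byte8 b = bitsFix 8 b := by
  simp only [byte8, bitsFix]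

theorem toBytesBE_succ (m n : Nat) :
    toBytesBE m (n + 1) = ((m >>> (8 * n)) % 256) :: toBytesBE m n := by
  simp only [toBytesBE, List.range_succ_eq_map, List.map_cons, List.map_map]
  congr 1
  apply List.map_congr_left
  intro i hi
  have hin : i < n := List.mem_range.mp hi
  simp only [Function.comp_apply, Nat.succ_eq_add_one]
  have h2 : n + 1 - 1 - (i + 1) = n - 1 - i := by omega
  rw [h2]

theorem bitsFix_mod256 (y : Nat) : bitsFix 8 (y % 256) = bitsFix 8 y := by
  simp only [bitsFix]
  apply List.map_congr_left
  intro i hi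
  have hik : i < 8 := List.mem_range.mp hi
  have : (256 : Nat) = 2 ^ 8 := by norm_num
  rw [this, Nat.testBit_mod_two_pow]
  have : 8 - 1 - i < 8 := by omega
  simp [this]

theorem bitsFix_split (k m : Nat) :
    bitsFix (8 * (k + 1)) m = bitsFix 8 (m >>> (8 * k)) ++ bitsFix (8 * k) m := by
  rw [show 8 * (k + 1) = 8 + 8 * k by ring]
  simp only [bitsFix]
  rw [List.range_add, List.map_append, List.map_map]
  congr 1
  · apply List.map_congr_left
    intro i hi
    have hik : i < 8 := List.mem_range.mp hi
    rw [Nat.testBit_shiftRight]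
    have h2 : 8 + 8 * k - 1 - i = 8 * k + (8 - 1 - i) := by omega
    rw [h2]
  · apply List.map_congr_left
    intro i hi
    have hik : i < 8 * k := List.mem_range.mp hi
    simp only [Function.comp]
    have h2 : 8 + 8 * k - 1 - (8 + i) = 8 * k - 1 - i := by omega
    rw [h2]

-- payload: the canonical string of width 8n equals B's per-byte construction
theorem bitsFix_flatMap (n m : Nat) :
    bitsFix (8 * n) m = (toBytesBE m n).flatMap byte8 := by
  induction n generalizing m with
  | zero => simp [toBytesBE, bitsFix_zero]
  | succ n ih =>
      rw [toBytesBE_succ, List.flatMap_cons, byte8_eq, bitsFix_mod256, bitsFix_split, ih]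

-- the guard constant 1 << 2040 as a power
theorem shl2040 : (1 <<< 2040 : Int) = 2 ^ 2040 := by
  show ((1 <<< 2040 : Nat) : Int) = 2 ^ 2040
  rw [Nat.shiftLeft_eq]
  push_cast
  ring

-- A-side result in canonical form equals B-side construction, on Nat, guard already taken
theorem encode_nat (m : Nat) (h : m < 2 ^ 2040) :
    padLoop (fmtB ((padLoop (fmtB m)).length / 8)) ++ padLoop (fmtB m)
      = byte8 (max 1 ((pyBitLength m + 7) / 8))
        ++ (toBytesBE m (max 1 ((pyBitLength m + 7) / 8))).flatMap byte8 := by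
  set N := max 1 ((pyBitLength m + 7) / 8) with hN
  have hOn : padLoop (fmtB m) = bitsFix (8 * N) m := padLoop_fmtB m
  have hdiv : (padLoop (fmtB m)).length / 8 = N := by
    rw [hOn, bitsFix_length]
    omega
  have hblen : pyBitLength m ≤ 2040 := (pyBitLength_le_iff 2040 m).mpr h
  have hNle : N ≤ 255 := by rw [hN]; omega
  have hblenN : pyBitLength N ≤ 8 :=
    (pyBitLength_le_iff 8 N).mpr (by simp only [show (2 : ℕ) ^ 8 = 256 from by norm_num]; omega)
  have hO0 : padLoop (fmtB N) = bitsFix 8 N := by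
    rw [padLoop_fmtB N]
    congr 2
    omega
  rw [hdiv, hO0, hOn, byte8_eq, bitsFix_flatMap]

-- ===== VERDICT (by name: the statement is the Claim_ definition above) =====
theorem left_encode_spec : Claim_equal_left_encode := by
  intro x _ hpre
  unfold Spec_left_encode
  obtain ⟨hx0, hxlt⟩ := hpre
  have hm : (x.toNat : Int) = x := Int.toNat_of_nonneg hx0
  have hmlt : x.toNat < 2 ^ 2040 := by
    have h2 : ((2 ^ 2040 : Nat) : Int) = 2 ^ 2040 := by push_cast; ring
    have h3 := hxlt
    rw [shl2040, ← hm, ← h2] at h3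
    exact_mod_cast h3
  rw [left_encode, left_encode_alt, if_pos (And.intro hx0 hxlt), if_pos (And.intro hx0 hxlt)]
  exact congrArg String.mk (encode_nat x.toNat hmlt)
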